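-- pv_equiv track=rewrite | github.com/marchwashere/ds-psr-scripts | piplup seed filter.py | checkPokerus
-- ===== SOURCE A (Python) =====
-- def rngAdvance(prev):
-- 	next=(1103515245*prev)+24691
-- 	return next%0x100000000
--
-- def rngOf(seed,frame):
-- 	prev=seed
-- 	for x in range(0,frame):
-- 		prev=rngAdvance(prev)
-- 	return prev
--
-- def checkPokerus(seed, low, high):
-- 	rng = rngOf(seed,low-1)
-- 	for x in range(low,high+1):
-- 		rng = rngAdvance(rng)
-- 		rnd=rng>>16
-- 		if rnd==0x4000 or rnd==0x8000 or rnd==0xc000: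
-- 			return x
-- 	return 999999999999
-- ===== SOURCE B (Python) =====
-- def checkPokerus(seed, low, high):
--     M = 1 << 32
--     a, c = 1103515245, 24691
--     # jump n = max(low-1, 0) advances in O(log n) by squaring the affine map
--     n = low - 1
--     if n < 0:
--         n = 0
--     A, C = 1, 0
--     pa, pc = a, c
--     while n:
--         if n & 1:
--             A, C = (pa * A) % M, (pa * C + pc) % M
--         pa, pc = (pa * pa) % M, (pa * pc + pc) % M
--         n >>= 1
--     rng = (A * seed + C) % M
--     x = low
--     while x <= high:
--         rng = (a * rng + c) % M
--         if (rng >> 16) in (0x4000, 0x8000, 0xc000):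
--             return x
--         x += 1
--     return 999999999999
-- ===== Notes on version B (the rewrite author's own statement) =====
-- stated objective: faster
-- what changed: Replaces the O(low) frame-by-frame warm-up loop (rngOf) with an O(log low) affine LCG jump computed by squaring the affine map (A,C), keeping only the low..high scan loop.
import Mathlib
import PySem

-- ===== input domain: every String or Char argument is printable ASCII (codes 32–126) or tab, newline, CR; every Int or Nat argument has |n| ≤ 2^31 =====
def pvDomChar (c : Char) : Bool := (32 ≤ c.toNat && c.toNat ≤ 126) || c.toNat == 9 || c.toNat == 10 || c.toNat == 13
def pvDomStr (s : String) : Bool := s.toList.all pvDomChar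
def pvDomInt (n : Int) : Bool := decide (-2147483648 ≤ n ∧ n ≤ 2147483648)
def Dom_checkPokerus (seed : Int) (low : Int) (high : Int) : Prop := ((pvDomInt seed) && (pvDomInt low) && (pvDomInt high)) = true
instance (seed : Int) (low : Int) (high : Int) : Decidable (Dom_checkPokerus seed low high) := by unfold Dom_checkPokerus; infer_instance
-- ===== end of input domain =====

-- B replaces A's O(low) frame-by-frame warm-up (rngOf) by an O(log low) affine LCG
-- jump (squaring the affine map), keeping the low..high scan; return values are equal.

-- ===== PORT A =====
def rngAdvance (prev : Int) : Int :=
  PySem.Int.mod (1103515245 * prev + 24691) 4294967296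

def rngOf (seed : Int) (frame : Int) : Int :=
  (PySem.List.pyRange 0 frame 1).foldl (fun prev _ => rngAdvance prev) seed

-- 'for x in range(low, high+1)' with early return, iterated lazily over the counter x
def checkLoopA (rng : Int) (x : Int) (high : Int) : Int :=
  if _h : x ≤ high then
    let r := rngAdvance rng
    let rnd := r >>> 16
    if rnd = 0x4000 ∨ rnd = 0x8000 ∨ rnd = 0xc000 then x
    else checkLoopA r (x + 1) high
  else 999999999999
  termination_by (high + 1 - x).toNat
  decreasing_by omega

def checkPokerus (seed : Int) (low : Int) (high : Int) : Int :=
  checkLoopA (rngOf seed (low - 1)) low high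

-- ===== PORT B =====
-- Source B's while-n loop squaring the affine map (A,C); n = max(low-1,0) is a
-- nonnegative int, carried as Nat (n & 1 = n % 2, n >>= 1 = n / 2 on nonneg ints).
def jumpB (pa pc A C : Int) (n : Nat) : Int × Int :=
  if n = 0 then (A, C)
  else
    let AC := if n % 2 = 1 then
        (PySem.Int.mod (pa * A) 4294967296, PySem.Int.mod (pa * C + pc) 4294967296)
      else (A, C)
    jumpB (PySem.Int.mod (pa * pa) 4294967296)
          (PySem.Int.mod (pa * pc + pc) 4294967296) AC.1 AC.2 (n / 2)
  termination_by n
  decreasing_by omega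

-- Source B's scan while-loop with counter x
def scanB (rng x high : Int) : Int :=
  if _h : x ≤ high then
    let r := PySem.Int.mod (1103515245 * rng + 24691) 4294967296
    if r >>> 16 = 0x4000 ∨ r >>> 16 = 0x8000 ∨ r >>> 16 = 0xc000 then x
    else scanB r (x + 1) high
  else 999999999999
  termination_by (high + 1 - x).toNat
  decreasing_by omega

def checkPokerus_alt (seed : Int) (low : Int) (high : Int) : Int :=
  let AC := jumpB 1103515245 24691 1 0 (low - 1).toNat
  scanB (PySem.Int.mod (AC.1 * seed + AC.2) 4294967296) low high

-- ===== PRECONDITION & SPEC =====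
def Spec_checkPokerus (seed : Int) (low : Int) (high : Int) (out : Int) : Prop := out = checkPokerus_alt seed low high
instance (seed : Int) (low : Int) (high : Int) (out : Int) : Decidable (Spec_checkPokerus seed low high out) := by unfold Spec_checkPokerus; infer_instance

-- ===== CLAIM (what is proved, stated in full; the proofs are below) =====
def Claim_equal_checkPokerus : Prop := ∀ (seed : Int) (low : Int) (high : Int), Dom_checkPokerus seed low high → Spec_checkPokerus seed low high (checkPokerus seed low high)

-- ===== LEMMAS AND PROOFS =====

-- the generic affine step modulo 2^32, with Lean's emod (= PySem.Int.mod for a positive divisor)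
def gstep (pa pc y : Int) : Int := (pa * y + pc) % 4294967296

theorem mod_eq_gstep (pa pc y : Int) :
    PySem.Int.mod (pa * y + pc) 4294967296 = gstep pa pc y := by
  simp [gstep]

theorem rngAdvance_eq (y : Int) : rngAdvance y = gstep 1103515245 24691 y := by
  simp [rngAdvance, gstep]

theorem gstep_mod (pa pc y : Int) : gstep pa pc (y % 4294967296) = gstep pa pc y := by
  unfold gstep
  conv_lhs => rw [Int.add_emod, Int.mul_emod, Int.emod_emod_of_dvd y dvd_rfl,
    ← Int.mul_emod, ← Int.add_emod]

theorem gstep_congr (pa pc y z : Int) (h : y % 4294967296 = z % 4294967296) :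
    gstep pa pc y = gstep pa pc z := by
  rw [← gstep_mod pa pc y, h, gstep_mod]

theorem gstep_mod_self (pa pc y : Int) : gstep pa pc y % 4294967296 = gstep pa pc y := by
  unfold gstep; rw [Int.emod_emod_of_dvd _ dvd_rfl]

-- doubling: one step of the squared map is two steps of the original
theorem gstep_sq (pa pc y : Int) :
    gstep (PySem.Int.mod (pa * pa) 4294967296) (PySem.Int.mod (pa * pc + pc) 4294967296) y
      = gstep pa pc (gstep pa pc y) := by
  simp only [PySem.Int.mod_eq_emod_of_pos (by norm_num : (0:Int) < 4294967296)]
  unfold gstep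
  conv_lhs => rw [Int.add_emod, Int.mul_emod, Int.emod_emod_of_dvd _ dvd_rfl,
    Int.emod_emod_of_dvd _ dvd_rfl, ← Int.mul_emod, ← Int.add_emod]
  conv_rhs => rw [Int.add_emod, Int.mul_emod, Int.emod_emod_of_dvd _ dvd_rfl,
    ← Int.mul_emod, ← Int.add_emod]
  ring_nf

theorem iterate_gstep_double (pa pc : Int) (k : Nat) (y : Int) :
    (gstep (PySem.Int.mod (pa * pa) 4294967296) (PySem.Int.mod (pa * pc + pc) 4294967296))^[k] y
      = (gstep pa pc)^[2 * k] y := by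
  induction k generalizing y with
  | zero => rfl
  | succ k ih =>
    rw [Function.iterate_succ_apply, ih, gstep_sq]
    have h2 : 2 * (k + 1) = (2 * k) + 1 + 1 := by omega
    rw [h2, Function.iterate_succ_apply, Function.iterate_succ_apply]

-- odd bit: absorbing one original step into the accumulator (A,C)
theorem gstep_odd (pa pc A C x : Int) :
    (PySem.Int.mod (pa * A) 4294967296 * x + PySem.Int.mod (pa * C + pc) 4294967296) % 4294967296
      = gstep pa pc ((A * x + C) % 4294967296) := by
  simp only [PySem.Int.mod_eq_emod_of_pos (by norm_num : (0:Int) < 4294967296)]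
  rw [gstep_mod]
  unfold gstep
  conv_lhs => rw [Int.add_emod, Int.mul_emod, Int.emod_emod_of_dvd _ dvd_rfl,
    Int.emod_emod_of_dvd _ dvd_rfl, ← Int.mul_emod, ← Int.add_emod]
  ring_nf

-- the jump computes exactly n iterated affine steps
theorem jumpB_spec (n : Nat) : ∀ (pa pc A C x : Int),
    ((jumpB pa pc A C n).1 * x + (jumpB pa pc A C n).2) % 4294967296
      = (gstep pa pc)^[n] ((A * x + C) % 4294967296) := by
  induction n using Nat.strong_induction_on with
  | _ n ih =>
    intro pa pc A C x
    by_cases h0 : n = 0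
    · subst h0; simp [jumpB]
    · rw [jumpB, if_neg h0]
      by_cases hodd : n % 2 = 1
      · rw [if_pos hodd]
        show ((jumpB (PySem.Int.mod (pa * pa) 4294967296) (PySem.Int.mod (pa * pc + pc) 4294967296)
            (PySem.Int.mod (pa * A) 4294967296) (PySem.Int.mod (pa * C + pc) 4294967296) (n / 2)).1 * x +
          (jumpB (PySem.Int.mod (pa * pa) 4294967296) (PySem.Int.mod (pa * pc + pc) 4294967296)
            (PySem.Int.mod (pa * A) 4294967296) (PySem.Int.mod (pa * C + pc) 4294967296) (n / 2)).2) % 4294967296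
          = (gstep pa pc)^[n] ((A * x + C) % 4294967296)
        rw [ih (n / 2) (by omega), gstep_odd, iterate_gstep_double]
        conv_rhs => rw [show n = 2 * (n / 2) + 1 from by omega]
        rw [Function.iterate_succ_apply]
      · rw [if_neg hodd]
        show ((jumpB (PySem.Int.mod (pa * pa) 4294967296) (PySem.Int.mod (pa * pc + pc) 4294967296)
            A C (n / 2)).1 * x +
          (jumpB (PySem.Int.mod (pa * pa) 4294967296) (PySem.Int.mod (pa * pc + pc) 4294967296)
            A C (n / 2)).2) % 4294967296
          = (gstep pa pc)^[n] ((A * x + C) % 4294967296)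
        rw [ih (n / 2) (by omega), iterate_gstep_double,
          ← show n = 2 * (n / 2) from by omega]

-- A's warm-up loop is n iterated steps (fold over a range ignores the elements)
theorem foldl_const_iterate {α : Type} (f : Int → Int) (s : Int) (l : List α) :
    l.foldl (fun p _ => f p) s = f^[l.length] s := by
  induction l generalizing s with
  | nil => rfl
  | cons a t ih => simp [List.foldl_cons, ih, Function.iterate_succ_apply]

theorem rngOf_eq (seed frame : Int) :
    rngOf seed frame = (gstep 1103515245 24691)^[frame.toNat] seed := by
  unfold rngOf
  rw [foldl_const_iterate, show rngAdvance = gstep 1103515245 24691 from funext rngAdvance_eq]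
  have hl : (PySem.List.pyRange 0 frame 1).length = frame.toNat := by
    rw [PySem.List.length_pyRange_one]; omega
  rw [hl]

-- iterating from congruent starts stays congruent mod 2^32
theorem iterate_gstep_congr (pa pc : Int) (n : Nat) (y z : Int)
    (h : y % 4294967296 = z % 4294967296) :
    (gstep pa pc)^[n] y % 4294967296 = (gstep pa pc)^[n] z % 4294967296 := by
  induction n generalizing y z with
  | zero => simpa
  | succ k ih =>
    rw [Function.iterate_succ_apply, Function.iterate_succ_apply]
    exact ih _ _ (by rw [gstep_congr pa pc y z h])

-- iterating from a reduced start stays reduced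
theorem iterate_gstep_mod_self (pa pc : Int) (n : Nat) (y : Int) :
    (gstep pa pc)^[n] (y % 4294967296) % 4294967296 = (gstep pa pc)^[n] (y % 4294967296) := by
  cases n with
  | zero => simp [Int.emod_emod_of_dvd _ dvd_rfl]
  | succ k => rw [Function.iterate_succ_apply', gstep_mod_self]

-- the two scan loops agree whenever the incoming states are congruent mod 2^32
theorem scan_eq (high : Int) : ∀ (k : Nat) (x r1 r2 : Int),
    (high + 1 - x).toNat = k → r1 % 4294967296 = r2 % 4294967296 →
    checkLoopA r1 x high = scanB r2 x high := by
  intro k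
  induction k with
  | zero =>
    intro x r1 r2 hk _
    have hx : ¬ x ≤ high := by omega
    rw [checkLoopA, dif_neg hx, scanB, dif_neg hx]
  | succ k ih =>
    intro x r1 r2 hk h
    have hx : x ≤ high := by omega
    rw [checkLoopA, dif_pos hx, scanB, dif_pos hx]
    have hstep : rngAdvance r1 = PySem.Int.mod (1103515245 * r2 + 24691) 4294967296 := by
      rw [rngAdvance_eq, gstep_congr _ _ _ _ h, ← mod_eq_gstep]
    rw [hstep]
    dsimp only []
    split_ifs with hc
    · rfl
    · exact ih (x + 1) _ _ (by omega) rfl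

-- ===== VERDICT (by name: the statement is the Claim_ definition above) =====
theorem checkPokerus_spec : Claim_equal_checkPokerus := by
  intro seed low high _
  unfold Spec_checkPokerus checkPokerus checkPokerus_alt
  apply scan_eq high (high + 1 - low).toNat low _ _ rfl
  rw [rngOf_eq, PySem.Int.mod_eq_emod_of_pos (by norm_num : (0:Int) < 4294967296),
    Int.emod_emod_of_dvd _ dvd_rfl, jumpB_spec, one_mul, add_zero,
    ← iterate_gstep_mod_self 1103515245 24691 ((low - 1).toNat) seed]
  exact iterate_gstep_congr _ _ _ _ _ (Int.emod_emod_of_dvd _ dvd_rfl).symm
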